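-- pv_equiv track=rewrite | github.com/VorotnjakJ13/UVP14-15 | 03_Funkcije/karo.py | narisi_karo3
-- ===== SOURCE A (Python) =====
-- def narisi_karo3(n):
--     s = ""
--     i = 0
--     while i < n:
--         s += (n - i - 1)*" " + (2*i + 1)*"*" + "\n"
--         i += 1
--
--     i = n - 2
--     while i >= 0:
--         s += (n - i - 1)*" " + (2*i + 1)*"*" + "\n"
--         i -= 1
--     return s
-- ===== SOURCE B (Python) =====
-- def narisi_karo3(n):
--     rows = []
--     for i in range(2*n - 1):
--         level = min(i, 2*n - 2 - i)
--         rows.append((n - level - 1)*" " + (2*level + 1)*"*" + "\n")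
--     return "".join(rows)
-- ===== Notes on version B (the rewrite author's own statement) =====
-- stated objective: alternative
-- what changed: Replaces A's two separate up/down while-loops that grow the result by repeated string concatenation with a single pass over the mirrored level index, collecting rows in a list and joining once.
import Mathlib
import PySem

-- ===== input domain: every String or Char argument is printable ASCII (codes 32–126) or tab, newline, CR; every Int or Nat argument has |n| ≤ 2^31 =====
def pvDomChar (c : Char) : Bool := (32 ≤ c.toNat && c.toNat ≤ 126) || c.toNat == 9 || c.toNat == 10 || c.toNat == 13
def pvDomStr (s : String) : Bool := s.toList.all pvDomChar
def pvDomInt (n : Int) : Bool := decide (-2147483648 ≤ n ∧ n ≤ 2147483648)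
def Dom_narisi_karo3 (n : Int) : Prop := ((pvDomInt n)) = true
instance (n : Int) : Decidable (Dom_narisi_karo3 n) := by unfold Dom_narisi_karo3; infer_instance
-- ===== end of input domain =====

-- B replaces A's two while-loops with one pass over range(2*n-1) driven by the mirrored
-- level index min(i, 2*n-2-i), joining the collected rows once (objective: alternative).

-- ===== PORT A =====
-- one Python row "(n-i-1)*' ' + (2*i+1)*'*' + '\n'" as a list of code points (exact:
-- Python string repetition with a non-positive count is empty, matching .toNat)
def pvRowA (n i : Int) : List Char :=
  List.replicate (n - i - 1).toNat ' ' ++ List.replicate (2*i + 1).toNat '*' ++ ['\n']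

-- first while loop: 'while i < n: s += row; i += 1'
def pvLoopUp (n : Int) (s : List Char) (i : Int) : List Char :=
  if i < n then pvLoopUp n (s ++ pvRowA n i) (i + 1) else s
termination_by (n - i).toNat
decreasing_by omega

-- second while loop: 'while i >= 0: s += row; i -= 1'
def pvLoopDown (n : Int) (s : List Char) (i : Int) : List Char :=
  if 0 ≤ i then pvLoopDown n (s ++ pvRowA n i) (i - 1) else s
termination_by (i + 1).toNat
decreasing_by omega

def narisi_karo3 (n : Int) : String :=
  String.ofList (pvLoopDown n (pvLoopUp n [] 0) (n - 2))

-- ===== PORT B =====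
-- one row of Source B, computed from the mirrored level index
def pvRowB (n i : Int) : List Char :=
  let level := min i (2*n - 2 - i)
  List.replicate (n - level - 1).toNat ' ' ++ List.replicate (2*level + 1).toNat '*' ++ ['\n']

def narisi_karo3_alt (n : Int) : String :=
  String.ofList (((PySem.List.pyRange 0 (2*n - 1) 1).map (pvRowB n)).flatten)

-- ===== PRECONDITION & SPEC =====
def Spec_narisi_karo3 (n : Int) (out : String) : Prop := out = narisi_karo3_alt n
instance (n : Int) (out : String) : Decidable (Spec_narisi_karo3 n out) := by unfold Spec_narisi_karo3; infer_instance

-- ===== CLAIM (what is proved, stated in full; the proofs are below) =====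
def Claim_equal_narisi_karo3 : Prop := ∀ (n : Int), Dom_narisi_karo3 n → Spec_narisi_karo3 n (narisi_karo3 n)

-- ===== LEMMAS AND PROOFS =====

-- the string produced by A's first loop from i upward, accumulator removed
def pvUpStr (n i : Int) : List Char :=
  if i < n then pvRowA n i ++ pvUpStr n (i + 1) else []
termination_by (n - i).toNat
decreasing_by omega

-- the string produced by A's second loop from i downward, accumulator removed
def pvDownStr (n i : Int) : List Char :=
  if 0 ≤ i then pvRowA n i ++ pvDownStr n (i - 1) else []
termination_by (i + 1).toNat
decreasing_by omega

theorem pvLoopUp_eq (n : Int) (s : List Char) (i : Int) :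
    pvLoopUp n s i = s ++ pvUpStr n i := by
  induction hk : (n - i).toNat using Nat.strong_induction_on generalizing s i with
  | _ k ih =>
    rw [pvLoopUp, pvUpStr]
    by_cases h : i < n
    · simp only [h, if_pos]
      rw [ih ((n - (i+1)).toNat) (by omega) _ _ rfl, List.append_assoc]
    · simp [h]

theorem pvLoopDown_eq (n : Int) (s : List Char) (i : Int) :
    pvLoopDown n s i = s ++ pvDownStr n i := by
  induction hk : (i + 1).toNat using Nat.strong_induction_on generalizing s i with
  | _ k ih =>
    rw [pvLoopDown, pvDownStr]
    by_cases h : 0 ≤ i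
    · simp only [h, if_pos]
      rw [ih ((i - 1) + 1).toNat (by omega) _ _ rfl, List.append_assoc]
    · simp [h]

-- B's rows over [i, n) are exactly A's ascending rows from i (there level = index)
theorem pvB_up (n i : Int) (h0 : 0 ≤ i) :
    ((PySem.List.pyRange i n 1).map (pvRowB n)).flatten = pvUpStr n i := by
  induction hk : (n - i).toNat using Nat.strong_induction_on generalizing i with
  | _ k ih =>
    rw [pvUpStr]
    by_cases h : i < n
    · rw [PySem.List.pyRange_one_cons h]
      simp only [List.map_cons, List.flatten_cons, if_pos h]
      rw [ih ((n - (i+1)).toNat) (by omega) _ (by omega) rfl]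
      congr 1
      unfold pvRowB pvRowA
      have : min i (2*n - 2 - i) = i := by omega
      rw [this]
    · rw [PySem.List.pyRange_one_eq_nil (by omega)]
      simp [h]

-- B's rows over [j, 2n-1) are exactly A's descending rows from 2n-2-j (mirrored level)
theorem pvB_down (n j : Int) (h0 : n ≤ j) :
    ((PySem.List.pyRange j (2*n - 1) 1).map (pvRowB n)).flatten = pvDownStr n (2*n - 2 - j) := by
  induction hk : (2*n - 1 - j).toNat using Nat.strong_induction_on generalizing j with
  | _ k ih =>
    rw [pvDownStr]
    by_cases h : j < 2*n - 1
    · rw [PySem.List.pyRange_one_cons h]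
      simp only [List.map_cons, List.flatten_cons, if_pos (show (0:Int) ≤ 2*n - 2 - j by omega)]
      rw [ih ((2*n - 1 - (j+1)).toNat) (by omega) _ (by omega) rfl]
      have e : 2*n - 2 - (j + 1) = 2*n - 2 - j - 1 := by ring
      rw [e]
      congr 1
      unfold pvRowB pvRowA
      have : min j (2*n - 2 - j) = 2*n - 2 - j := by omega
      rw [this]
    · rw [PySem.List.pyRange_one_eq_nil (by omega),
        if_neg (show ¬ (0:Int) ≤ 2*n - 2 - j by omega)]
      simp

-- ===== VERDICT (by name: the statement is the Claim_ definition above) =====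
theorem narisi_karo3_spec : Claim_equal_narisi_karo3 := by
  intro n _
  unfold Spec_narisi_karo3 narisi_karo3 narisi_karo3_alt
  rw [pvLoopUp_eq, pvLoopDown_eq, List.nil_append]
  congr 1
  by_cases hn : 0 < n
  · rw [PySem.List.pyRange_one_append 0 n (2*n - 1) (by omega) (by omega),
      List.map_append, List.flatten_append, pvB_up n 0 le_rfl,
      pvB_down n n le_rfl]
    have : 2*n - 2 - n = n - 2 := by ring
    rw [this]
  · rw [PySem.List.pyRange_one_eq_nil (by omega)]
    rw [pvUpStr, pvDownStr, if_neg hn, if_neg (show ¬ (0:Int) ≤ n - 2 by omega)]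
    simp
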